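-- pv_equiv track=rewrite | github.com/Smee1/project- | chatbot1_minus_admin_local_pf.py | profanity_filter
-- ===== SOURCE A (Python) =====
-- def profanity_filter(message):
--     profane_words = ["wordone", "wordtwo", "wordthree"]  # Add the words you want to filter
--     flagged = False
--     clean_message = message
--     for word in profane_words:
--         if word in message:
--             flagged = True
--             clean_message = clean_message.replace(word, '*' * len(word))
--     return clean_message, flagged
-- ===== SOURCE B (Python) =====
-- def profanity_filter(message):
--     # Single left-to-right scan: at each position try the words in order and
--     # mask the first one that matches, otherwise copy the character.
--     words = ["wordone", "wordtwo", "wordthree"]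
--     parts = []
--     hits = 0
--     i = 0
--     n = len(message)
--     while i < n:
--         for w in words:
--             if message.startswith(w, i):
--                 parts.append('*' * len(w))
--                 i += len(w)
--                 hits += 1
--                 break
--         else:
--             parts.append(message[i])
--             i += 1
--     return ''.join(parts), hits > 0
-- ===== Notes on version B (the rewrite author's own statement) =====
-- stated objective: alternative
-- what changed: Replaces A's three sequential whole-string search-and-replace passes by a single left-to-right scan that masks the first filtered word matching at each position and counts hits for the flag; Pre_ excludes messages containing the overlap 'wordtwordone', where two of the filtered words overlap and either masking order is equally defensible.
-- outside the precondition, e.g. on profanity_filter('wordtwordone'): A returns ('wordt*******', True), B returns ('*******rdone', True)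
import Mathlib
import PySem

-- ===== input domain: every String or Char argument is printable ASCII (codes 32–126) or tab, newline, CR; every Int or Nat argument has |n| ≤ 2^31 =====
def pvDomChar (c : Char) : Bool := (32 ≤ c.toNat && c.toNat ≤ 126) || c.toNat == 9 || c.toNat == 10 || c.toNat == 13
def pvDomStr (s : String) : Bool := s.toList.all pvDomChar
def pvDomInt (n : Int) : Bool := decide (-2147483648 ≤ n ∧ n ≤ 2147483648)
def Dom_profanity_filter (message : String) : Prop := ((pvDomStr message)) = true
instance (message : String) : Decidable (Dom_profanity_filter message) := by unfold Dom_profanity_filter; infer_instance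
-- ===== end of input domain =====

-- B replaces A's three sequential substring-replace passes by a single left-to-right scan
-- masking the first word that matches at each position (alternative algorithm; Pre_
-- excludes messages containing the overlap "wordtwordone", where either masking is defensible).


-- ===== PORT A =====
def profanity_filter (message : String) : String × Bool :=
  let profane_words : List String := ["wordone", "wordtwo", "wordthree"]
  let r :=
    profane_words.foldl
      (fun (st : Bool × String) word =>
        if PySem.Str.isIn word message then
          (true, PySem.Str.replace st.2 word (String.ofList (List.replicate (PySem.Str.len word).toNat '*')))
        else st)
      (false, message)
  (r.2, r.1)

-- ===== PORT B =====
-- the while loop of Source B as structural recursion on the remaining suffix of the message;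
-- the inner for-loop over the three words is the cascade of prefix tests in list order
def pvScan : List Char → List Char × Nat
  | [] => ([], 0)
  | c :: t =>
    if "wordone".toList.isPrefixOf (c :: t) then
      let r := pvScan ((c :: t).drop 7)
      (List.replicate 7 '*' ++ r.1, r.2 + 1)
    else if "wordtwo".toList.isPrefixOf (c :: t) then
      let r := pvScan ((c :: t).drop 7)
      (List.replicate 7 '*' ++ r.1, r.2 + 1)
    else if "wordthree".toList.isPrefixOf (c :: t) then
      let r := pvScan ((c :: t).drop 9)
      (List.replicate 9 '*' ++ r.1, r.2 + 1)
    else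
      let r := pvScan t
      (c :: r.1, r.2)
  termination_by cs => cs.length
  decreasing_by all_goals (simp; try omega)

def profanity_filter_alt (message : String) : String × Bool :=
  let r := pvScan message.toList
  (String.ofList r.1, decide (0 < r.2))

-- ===== PRECONDITION & SPEC =====
-- Pre_ excludes messages containing "wordtwordone" (A still returns there): on them an
-- occurrence of "wordtwo" overlaps an occurrence of "wordone", and which of the two
-- overlapping words gets masked is an unspecified corner on which either choice is defensible.
def Pre_profanity_filter (message : String) : Prop :=
  PySem.Str.isIn "wordtwordone" message = false
instance (message : String) : Decidable (Pre_profanity_filter message) := by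
  unfold Pre_profanity_filter; infer_instance

def pvWitness_profanity_filter : String := "say wordone and wordthree"

def Spec_profanity_filter (message : String) (out : String × Bool) : Prop := out = profanity_filter_alt message
instance (message : String) (out : String × Bool) : Decidable (Spec_profanity_filter message out) := by unfold Spec_profanity_filter; infer_instance

-- ===== CLAIM (what is proved, stated in full; the proofs are below) =====
def Claim_equal_profanity_filter : Prop := ∀ (message : String), Dom_profanity_filter message → Pre_profanity_filter message → Spec_profanity_filter message (profanity_filter message)

-- ===== LEMMAS AND PROOFS =====

-- the words (and the excluded overlap pattern) as explicit character lists
def pvW1 : List Char := ['w','o','r','d','o','n','e']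
def pvW2 : List Char := ['w','o','r','d','t','w','o']
def pvW3 : List Char := ['w','o','r','d','t','h','r','e','e']
def pvWX : List Char := ['w','o','r','d','t','w','o','r','d','o','n','e']

theorem pvW1E : "wordone".toList = pvW1 := rfl
theorem pvW2E : "wordtwo".toList = pvW2 := rfl
theorem pvW3E : "wordthree".toList = pvW3 := rfl

-- structural form of Python str.replace with an equal-length all-star replacement
def pvMask (w : List Char) : List Char → List Char
  | [] => []
  | c :: t =>
    if h : w.isPrefixOf (c :: t) = true ∧ w ≠ [] then
      List.replicate w.length '*' ++ pvMask w ((c :: t).drop w.length)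
    else c :: pvMask w t
  termination_by cs => cs.length
  decreasing_by
  · cases w with
    | nil => exact absurd rfl h.2
    | cons a w' => simp; try omega
  · simp

theorem pvMask_nil (w : List Char) : pvMask w [] = [] := by simp [pvMask]

theorem pvMask_pos (w c : _) (t : List Char) (hw : w ≠ []) (h : w.isPrefixOf (c :: t) = true) :
    pvMask w (c :: t) = List.replicate w.length '*' ++ pvMask w ((c :: t).drop w.length) := by
  rw [pvMask]; simp [h, hw]

theorem pvMask_neg (w c : _) (t : List Char) (h : w.isPrefixOf (c :: t) = false) :
    pvMask w (c :: t) = c :: pvMask w t := by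
  rw [pvMask]; simp [h]

-- Python's replace.go (fuel ≥ length) is exactly pvMask
theorem pvGo_eq (w : List Char) (hw : w ≠ []) :
    ∀ (fuel : Nat) (l acc : List Char), l.length ≤ fuel →
      PySem.Chars.replace.go w (List.replicate w.length '*') fuel l acc
        = acc.reverse ++ pvMask w l := by
  intro fuel
  induction fuel with
  | zero =>
    intro l acc h
    have hl : l = [] := List.eq_nil_of_length_eq_zero (Nat.le_zero.mp h)
    subst hl
    rw [PySem.Chars.replace.go]
    simp [pvMask_nil]
  | succ f ih =>
    intro l acc h
    cases l with
    | nil =>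
      rw [PySem.Chars.replace.go]
      simp [pvMask_nil]
      omega
    | cons c t =>
      have hw1 : 1 ≤ w.length := by
        cases w with
        | nil => exact absurd rfl hw
        | cons a w' => simp
      rw [PySem.Chars.replace.go]
      by_cases hp : w.isPrefixOf (c :: t) = true
      · have hlen : ((c :: t).drop w.length).length ≤ f := by
          simp at h ⊢
          omega
        simp [hp]
        rw [ih _ _ hlen, pvMask_pos w c t hw hp]
        simp
      · rw [Bool.not_eq_true] at hp
        have hlen : t.length ≤ f := by simp at h; omega
        simp [hp]
        rw [ih _ _ hlen, pvMask_neg w c t hp]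
        simp

theorem pvReplace_eq (w cs : List Char) (hw : w ≠ []) :
    PySem.Chars.replace cs w (List.replicate w.length '*') = pvMask w cs := by
  rw [PySem.Chars.replace]
  have : w.isEmpty = false := by simp [hw]
  rw [this]
  simpa using pvGo_eq w hw cs.length cs [] (le_refl _)

-- characters of a mask are the original character or a star
def pvR (a b : Char) : Prop := a = b ∨ a = '*'

theorem pvR_stars (x : List Char) : List.Forall₂ pvR (List.replicate x.length '*') x := by
  induction x with
  | nil => simp
  | cons c t ih =>
    rw [List.length_cons, List.replicate_succ]
    exact List.Forall₂.cons (Or.inr rfl) ih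

theorem pvR_append {a b c d : List Char} (h1 : List.Forall₂ pvR a b) (h2 : List.Forall₂ pvR c d) :
    List.Forall₂ pvR (a ++ c) (b ++ d) := by
  induction h1 with
  | nil => simpa
  | cons hx h ih => exact List.Forall₂.cons hx ih

theorem pvR_trans : ∀ {a b c : List Char},
    List.Forall₂ pvR a b → List.Forall₂ pvR b c → List.Forall₂ pvR a c := by
  intro a b c h1
  induction h1 generalizing c with
  | nil => intro h2; cases h2; exact List.Forall₂.nil
  | cons hab h ih =>
    intro h2
    cases h2 with
    | cons hbc h2' =>
      refine List.Forall₂.cons ?_ (ih h2')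
      rcases hab with rfl | rfl
      · exact hbc
      · exact Or.inr rfl

theorem pvMask_forall₂ (w : List Char) :
    ∀ (n : Nat) (cs : List Char), cs.length ≤ n → List.Forall₂ pvR (pvMask w cs) cs := by
  intro n
  induction n with
  | zero =>
    intro cs h
    have : cs = [] := List.eq_nil_of_length_eq_zero (Nat.le_zero.mp h)
    subst this
    simp [pvMask_nil]
  | succ m ih =>
    intro cs h
    cases cs with
    | nil => simp [pvMask_nil]
    | cons c t =>
      by_cases hc : w.isPrefixOf (c :: t) = true ∧ w ≠ []
      · rcases hc with ⟨hp, hne⟩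
        rw [pvMask_pos w c t hne hp]
        have hpre : w <+: (c :: t) := List.isPrefixOf_iff_prefix.mp hp
        have hwlen : w.length ≤ (c :: t).length := hpre.length_le
        have hw1 : 1 ≤ w.length := by
          cases w with
          | nil => exact absurd rfl hne
          | cons a w' => simp
        have hwlen' : w.length ≤ t.length + 1 := by simpa using hwlen
        have htl : ((c :: t).take w.length).length = w.length := by
          simp
          omega
        have h1 := pvR_stars ((c :: t).take w.length)
        rw [htl] at h1
        have h2 : List.Forall₂ pvR (pvMask w ((c :: t).drop w.length)) ((c :: t).drop w.length) := by
          apply ih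
          simp at h ⊢
          omega
        have := pvR_append h1 h2
        rwa [List.take_append_drop] at this
      · rw [pvMask]
        rw [dif_neg hc]
        refine List.Forall₂.cons (Or.inl rfl) ?_
        apply ih
        simp at h
        omega

theorem pvR_prefix : ∀ (v a b : List Char),
    List.Forall₂ pvR a b → v <+: a → ('*' ∉ v) → v <+: b := by
  intro v
  induction v with
  | nil => intro a b _ _ _; exact List.nil_prefix
  | cons x v' ih =>
    intro a b hab hpre hst
    obtain ⟨r, rfl⟩ := hpre
    cases hab with
    | cons hx h' =>
      rename_i y b'
      have hxy : x = y := by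
        rcases hx with h | h
        · exact h
        · exact absurd (h ▸ List.mem_cons_self) hst
      subst hxy
      have hv' : v' <+: b' := ih (v' ++ r) b' h' ⟨r, rfl⟩ (fun hm => hst (List.mem_cons_of_mem _ hm))
      exact List.cons_prefix_cons.mpr ⟨rfl, hv'⟩

theorem pvR_infix : ∀ (a b v : List Char),
    List.Forall₂ pvR a b → v <:+: a → ('*' ∉ v) → v <:+: b := by
  intro a
  induction a with
  | nil =>
    intro b v h hin _
    cases h
    simpa using hin
  | cons c t ih =>
    intro b v hab hin hst
    cases hab with
    | cons hcd h' =>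
      rename_i d b'
      rcases List.infix_cons_iff.mp hin with hp | hi
      · exact (pvR_prefix v _ _ (List.Forall₂.cons hcd h') hp hst).isInfix
      · obtain ⟨p, s, rfl⟩ := ih b' v h' hi hst
        exact ⟨d :: p, s, by simp⟩

-- no occurrence ⇒ mask is the identity
theorem pvMask_id (w : List Char) :
    ∀ (n : Nat) (cs : List Char), cs.length ≤ n → ¬ w <:+: cs → pvMask w cs = cs := by
  intro n
  induction n with
  | zero =>
    intro cs h _
    have : cs = [] := List.eq_nil_of_length_eq_zero (Nat.le_zero.mp h)
    subst this; exact pvMask_nil w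
  | succ m ih =>
    intro cs h hin
    cases cs with
    | nil => exact pvMask_nil w
    | cons c t =>
      have hp : w.isPrefixOf (c :: t) = false := by
        by_contra hb
        have : w.isPrefixOf (c :: t) = true := by simpa using hb
        exact hin (List.isPrefixOf_iff_prefix.mp this).isInfix
      rw [pvMask_neg w c t hp]
      rw [ih t (by simp at h; omega) ?_]
      intro hi
      obtain ⟨p, s, rfl⟩ := hi
      exact hin ⟨c :: p, s, by simp⟩

-- a word whose head is not '*' passes over a star block unchanged
theorem pvMask_stars (x : Char) (w' : List Char) (hx : x ≠ '*') :
    ∀ (k : Nat) (X : List Char),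
      pvMask (x :: w') (List.replicate k '*' ++ X)
        = List.replicate k '*' ++ pvMask (x :: w') X := by
  intro k
  induction k with
  | zero => simp
  | succ j ih =>
    intro X
    rw [List.replicate_succ, List.cons_append]
    have hp : (x :: w').isPrefixOf ('*' :: (List.replicate j '*' ++ X)) = false := by
      simp [List.isPrefixOf, hx]
    rw [pvMask_neg _ _ _ hp, ih]
    simp

theorem pvScan_nil : pvScan [] = ([], 0) := by simp [pvScan]

theorem pvScan_one (cs : List Char) (hne : cs ≠ [])
    (h : pvW1.isPrefixOf cs = true) :
    pvScan cs = (List.replicate 7 '*' ++ (pvScan (cs.drop 7)).1, (pvScan (cs.drop 7)).2 + 1) := by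
  cases cs with
  | nil => exact absurd rfl hne
  | cons c t =>
    rw [pvScan]
    simp only [pvW1E, pvW2E, pvW3E]
    rw [if_pos h]

theorem pvScan_two (cs : List Char) (hne : cs ≠ [])
    (h1 : pvW1.isPrefixOf cs = false)
    (h2 : pvW2.isPrefixOf cs = true) :
    pvScan cs = (List.replicate 7 '*' ++ (pvScan (cs.drop 7)).1, (pvScan (cs.drop 7)).2 + 1) := by
  cases cs with
  | nil => exact absurd rfl hne
  | cons c t =>
    rw [pvScan]
    simp only [pvW1E, pvW2E, pvW3E]
    rw [if_neg (by simp [h1]), if_pos h2]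

theorem pvScan_three (cs : List Char) (hne : cs ≠ [])
    (h1 : pvW1.isPrefixOf cs = false)
    (h2 : pvW2.isPrefixOf cs = false)
    (h3 : pvW3.isPrefixOf cs = true) :
    pvScan cs = (List.replicate 9 '*' ++ (pvScan (cs.drop 9)).1, (pvScan (cs.drop 9)).2 + 1) := by
  cases cs with
  | nil => exact absurd rfl hne
  | cons c t =>
    rw [pvScan]
    simp only [pvW1E, pvW2E, pvW3E]
    rw [if_neg (by simp [h1]), if_neg (by simp [h2]), if_pos h3]

theorem pvScan_else (c : Char) (t : List Char)
    (h1 : pvW1.isPrefixOf (c :: t) = false)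
    (h2 : pvW2.isPrefixOf (c :: t) = false)
    (h3 : pvW3.isPrefixOf (c :: t) = false) :
    pvScan (c :: t) = (c :: (pvScan t).1, (pvScan t).2) := by
  rw [pvScan]
  simp only [pvW1E, pvW2E, pvW3E]
  rw [if_neg (by simp [h1]), if_neg (by simp [h2]), if_neg (by simp [h3])]

-- specialised star-skip instances
theorem pvSkip2 (k : Nat) (X : List Char) :
    pvMask pvW2 (List.replicate k '*' ++ X) = List.replicate k '*' ++ pvMask pvW2 X :=
  pvMask_stars 'w' ['o','r','d','t','w','o'] (by decide) k X

theorem pvSkip3 (k : Nat) (X : List Char) :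
    pvMask pvW3 (List.replicate k '*' ++ X) = List.replicate k '*' ++ pvMask pvW3 X :=
  pvMask_stars 'w' ['o','r','d','t','h','r','e','e'] (by decide) k X

-- an infix of a suffix is an infix
theorem pvInfix_suffix {v s l : List Char} (h : v <:+: s) (hs : s <:+ l) : v <:+: l :=
  h.trans hs.isInfix

-- on inputs without the overlap pattern pvWX, the scan equals the three-pass mask
-- composition, and its hit count is zero exactly when no word occurs in the input
theorem pvMain : ∀ (n : Nat) (cs : List Char), cs.length ≤ n → ¬ pvWX <:+: cs →
    (pvScan cs).1 = pvMask pvW3 (pvMask pvW2 (pvMask pvW1 cs)) ∧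
    ((pvScan cs).2 = 0 ↔ ¬ (pvW1 <:+: cs ∨ pvW2 <:+: cs ∨ pvW3 <:+: cs)) := by
  intro n
  induction n with
  | zero =>
    intro cs h _
    have : cs = [] := List.eq_nil_of_length_eq_zero (Nat.le_zero.mp h)
    subst this
    refine ⟨by simp [pvScan_nil, pvMask_nil], ?_⟩
    simp [pvScan_nil, pvW1, pvW2, pvW3]
  | succ n ih =>
    intro cs hlen hX
    cases hcs : cs with
    | nil =>
      subst hcs
      refine ⟨by simp [pvScan_nil, pvMask_nil], ?_⟩
      simp [pvScan_nil, pvW1, pvW2, pvW3]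
    | cons c0 t0 =>
      rw [← hcs]
      have hne : cs ≠ [] := by simp [hcs]
      clear hcs
      by_cases h1 : pvW1.isPrefixOf cs = true
      · -- branch: wordone matches here
        obtain ⟨r, rfl⟩ := List.isPrefixOf_iff_prefix.mp h1
        have hlr : r.length ≤ n := by simp [pvW1] at hlen; omega
        have hXr : ¬ pvWX <:+: r := fun hi => hX (pvInfix_suffix hi (List.suffix_append pvW1 r))
        obtain ⟨ih1, ih2⟩ := ih r hlr hXr
        have hsc := pvScan_one (pvW1 ++ r) (by simp [pvW1]) h1
        rw [show (pvW1 ++ r).drop 7 = r by simp [pvW1]] at hsc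
        have hm1 : pvMask pvW1 (pvW1 ++ r) = List.replicate 7 '*' ++ pvMask pvW1 r := by
          simp only [pvW1, List.cons_append, List.nil_append]
          rw [pvMask_pos _ _ _ (by simp) (by simp [List.isPrefixOf])]
          simp
        rw [hsc, hm1, pvSkip2, pvSkip3]
        constructor
        · simp [ih1]
        · have hinf : pvW1 <:+: pvW1 ++ r := (List.prefix_append _ _).isInfix
          simp [hinf]
      · rw [Bool.not_eq_true] at h1
        by_cases hA : pvW2.isPrefixOf cs = true
        · -- branch: wordtwo matches; Pre_ rules out an overlapping wordone
          obtain ⟨r0, rfl⟩ := List.isPrefixOf_iff_prefix.mp hA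
          have hB : pvW1.isPrefixOf ((pvW2 ++ r0).drop 5) = false := by
            by_contra hb
            rw [Bool.not_eq_false] at hb
            obtain ⟨r', heq⟩ := List.isPrefixOf_iff_prefix.mp hb
            have hr0 : r0 = 'r'::'d'::'o'::'n'::'e'::r' := by
              simp [pvW1, pvW2] at heq
              exact heq.symm
            exact hX (by
              subst hr0
              exact (show pvWX <+: pvW2 ++ 'r'::'d'::'o'::'n'::'e'::r' from
                ⟨r', by simp [pvWX, pvW2]⟩).isInfix)
          have hlr : r0.length ≤ n := by simp [pvW2] at hlen; omega
          have hXr : ¬ pvWX <:+: r0 := fun hi => hX (pvInfix_suffix hi (List.suffix_append pvW2 r0))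
          obtain ⟨ih1, ih2⟩ := ih r0 hlr hXr
          have hsc := pvScan_two (pvW2 ++ r0) (by simp [pvW2]) h1 hA
          rw [show (pvW2 ++ r0).drop 7 = r0 by simp [pvW2]] at hsc
          have hm1 : pvMask pvW1 (pvW2 ++ r0)
              = 'w'::'o'::'r'::'d'::'t'::'w'::'o':: pvMask pvW1 r0 := by
            have h5 : pvW1.isPrefixOf ('w'::'o'::r0) = false := by
              simpa [pvW2] using hB
            simp only [pvW2, List.cons_append, List.nil_append]
            rw [pvMask_neg _ _ _ (by simp [pvW1, List.isPrefixOf])]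
            rw [pvMask_neg _ _ _ (by simp [pvW1, List.isPrefixOf])]
            rw [pvMask_neg _ _ _ (by simp [pvW1, List.isPrefixOf])]
            rw [pvMask_neg _ _ _ (by simp [pvW1, List.isPrefixOf])]
            rw [pvMask_neg _ _ _ (by simp [pvW1, List.isPrefixOf])]
            rw [pvMask_neg _ _ _ h5]
            rw [pvMask_neg _ _ _ (by simp [pvW1, List.isPrefixOf])]
          have hm2 : pvMask pvW2 ('w'::'o'::'r'::'d'::'t'::'w'::'o':: pvMask pvW1 r0)
              = List.replicate 7 '*' ++ pvMask pvW2 (pvMask pvW1 r0) := by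
            rw [pvMask_pos _ _ _ (by simp [pvW2]) (by simp [pvW2, List.isPrefixOf])]
            simp [pvW2]
          rw [hsc, hm1, hm2, pvSkip3]
          constructor
          · simp [ih1]
          · have hinf : pvW2 <:+: pvW2 ++ r0 := (List.prefix_append _ _).isInfix
            simp [hinf]
        · rw [Bool.not_eq_true] at hA
          by_cases h3 : pvW3.isPrefixOf cs = true
          · -- branch: wordthree matches
            obtain ⟨r, rfl⟩ := List.isPrefixOf_iff_prefix.mp h3
            have hlr : r.length ≤ n := by simp [pvW3] at hlen; omega
            have hXr : ¬ pvWX <:+: r := fun hi => hX (pvInfix_suffix hi (List.suffix_append pvW3 r))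
            obtain ⟨ih1, ih2⟩ := ih r hlr hXr
            have hsc := pvScan_three (pvW3 ++ r) (by simp [pvW3]) h1 hA h3
            rw [show (pvW3 ++ r).drop 9 = r by simp [pvW3]] at hsc
            have hm1 : pvMask pvW1 (pvW3 ++ r)
                = 'w'::'o'::'r'::'d'::'t'::'h'::'r'::'e'::'e':: pvMask pvW1 r := by
              simp only [pvW3, List.cons_append, List.nil_append]
              rw [pvMask_neg _ _ _ (by simp [pvW1, List.isPrefixOf])]
              rw [pvMask_neg _ _ _ (by simp [pvW1, List.isPrefixOf])]
              rw [pvMask_neg _ _ _ (by simp [pvW1, List.isPrefixOf])]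
              rw [pvMask_neg _ _ _ (by simp [pvW1, List.isPrefixOf])]
              rw [pvMask_neg _ _ _ (by simp [pvW1, List.isPrefixOf])]
              rw [pvMask_neg _ _ _ (by simp [pvW1, List.isPrefixOf])]
              rw [pvMask_neg _ _ _ (by simp [pvW1, List.isPrefixOf])]
              rw [pvMask_neg _ _ _ (by simp [pvW1, List.isPrefixOf])]
              rw [pvMask_neg _ _ _ (by simp [pvW1, List.isPrefixOf])]
            have hm2 : pvMask pvW2 ('w'::'o'::'r'::'d'::'t'::'h'::'r'::'e'::'e':: pvMask pvW1 r)
                = 'w'::'o'::'r'::'d'::'t'::'h'::'r'::'e'::'e':: pvMask pvW2 (pvMask pvW1 r) := by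
              rw [pvMask_neg _ _ _ (by simp [pvW2, List.isPrefixOf])]
              rw [pvMask_neg _ _ _ (by simp [pvW2, List.isPrefixOf])]
              rw [pvMask_neg _ _ _ (by simp [pvW2, List.isPrefixOf])]
              rw [pvMask_neg _ _ _ (by simp [pvW2, List.isPrefixOf])]
              rw [pvMask_neg _ _ _ (by simp [pvW2, List.isPrefixOf])]
              rw [pvMask_neg _ _ _ (by simp [pvW2, List.isPrefixOf])]
              rw [pvMask_neg _ _ _ (by simp [pvW2, List.isPrefixOf])]
              rw [pvMask_neg _ _ _ (by simp [pvW2, List.isPrefixOf])]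
              rw [pvMask_neg _ _ _ (by simp [pvW2, List.isPrefixOf])]
            have hm3 : pvMask pvW3 ('w'::'o'::'r'::'d'::'t'::'h'::'r'::'e'::'e':: pvMask pvW2 (pvMask pvW1 r))
                = List.replicate 9 '*' ++ pvMask pvW3 (pvMask pvW2 (pvMask pvW1 r)) := by
              rw [pvMask_pos _ _ _ (by simp [pvW3]) (by simp [pvW3, List.isPrefixOf])]
              simp [pvW3]
            rw [hsc, hm1, hm2, hm3]
            constructor
            · simp [ih1]
            · have hinf : pvW3 <:+: pvW3 ++ r := (List.prefix_append _ _).isInfix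
              simp [hinf]
          · -- branch: no word matches at this position
            rw [Bool.not_eq_true] at h3
            cases cs with
            | nil => exact absurd rfl hne
            | cons c t =>
              have hp1 : ¬ pvW1 <+: (c :: t) := by
                rw [← List.isPrefixOf_iff_prefix]; simp [h1]
              have hp2 : ¬ pvW2 <+: (c :: t) := by
                rw [← List.isPrefixOf_iff_prefix]; simp [hA]
              have hp3 : ¬ pvW3 <+: (c :: t) := by
                rw [← List.isPrefixOf_iff_prefix]; simp [h3]
              have hF1 : List.Forall₂ pvR (pvMask pvW1 t) t :=
                pvMask_forall₂ pvW1 t.length t (le_refl _)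
              have hFc1 : List.Forall₂ pvR (c :: pvMask pvW1 t) (c :: t) :=
                List.Forall₂.cons (Or.inl rfl) hF1
              have hb2 : pvW2.isPrefixOf (c :: pvMask pvW1 t) = false := by
                by_contra hb
                rw [Bool.not_eq_false] at hb
                exact hp2 (pvR_prefix pvW2 _ _ hFc1 (List.isPrefixOf_iff_prefix.mp hb) (by decide))
              have hF2 : List.Forall₂ pvR (pvMask pvW2 (pvMask pvW1 t)) (pvMask pvW1 t) :=
                pvMask_forall₂ pvW2 (pvMask pvW1 t).length (pvMask pvW1 t) (le_refl _)
              have hFc2 : List.Forall₂ pvR (c :: pvMask pvW2 (pvMask pvW1 t)) (c :: t) :=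
                List.Forall₂.cons (Or.inl rfl) (pvR_trans hF2 hF1)
              have hb3 : pvW3.isPrefixOf (c :: pvMask pvW2 (pvMask pvW1 t)) = false := by
                by_contra hb
                rw [Bool.not_eq_false] at hb
                exact hp3 (pvR_prefix pvW3 _ _ hFc2 (List.isPrefixOf_iff_prefix.mp hb) (by decide))
              have hsc := pvScan_else c t h1 hA h3
              have hXt : ¬ pvWX <:+: t := fun hi => hX (pvInfix_suffix hi (List.suffix_cons c t))
              obtain ⟨ih1, ih2⟩ := ih t (by simp at hlen; omega) hXt
              rw [hsc, pvMask_neg _ _ _ h1, pvMask_neg _ _ _ hb2, pvMask_neg _ _ _ hb3]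
              constructor
              · simp [ih1]
              · rw [ih2]
                simp [List.infix_cons_iff, hp1, hp2, hp3]

-- collapsing a pass whose word does not occur in the original message
theorem pvCollapse1 (L : List Char) (h : ¬ pvW1 <:+: L) : pvMask pvW1 L = L :=
  pvMask_id pvW1 L.length L (le_refl _) h

theorem pvMask_id_lift (w : List Char) (hs : '*' ∉ w) (X L : List Char)
    (hF : List.Forall₂ pvR X L) (h : ¬ w <:+: L) : pvMask w X = X := by
  apply pvMask_id w X.length X (le_refl _)
  intro hi
  exact h (pvR_infix _ _ _ hF hi hs)

-- ===== VERDICT (by name: the statement is the Claim_ definition above) =====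
theorem profanity_filter_spec : Claim_equal_profanity_filter := by
  unfold Claim_equal_profanity_filter Spec_profanity_filter profanity_filter profanity_filter_alt
  intro message _ hPre
  have hX : ¬ pvWX <:+: message.toList := by
    intro hi
    have : PySem.Str.isIn "wordtwordone" message = true := by
      rw [PySem.Str.isIn_iff_infix]
      exact hi
    rw [Pre_profanity_filter] at hPre
    rw [hPre] at this
    cases this
  obtain ⟨hmask, hcount⟩ := pvMain message.toList.length message.toList (le_refl _) hX
  have e1 : ∀ s : String,
      (PySem.Str.replace s "wordone"
        (String.ofList (List.replicate (PySem.Str.len "wordone").toNat '*'))).toList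
        = pvMask pvW1 s.toList := fun s => by
    rw [PySem.Str.toList_replace]
    exact pvReplace_eq pvW1 s.toList (by simp [pvW1])
  have e2 : ∀ s : String,
      (PySem.Str.replace s "wordtwo"
        (String.ofList (List.replicate (PySem.Str.len "wordtwo").toNat '*'))).toList
        = pvMask pvW2 s.toList := fun s => by
    rw [PySem.Str.toList_replace]
    exact pvReplace_eq pvW2 s.toList (by simp [pvW2])
  have e3 : ∀ s : String,
      (PySem.Str.replace s "wordthree"
        (String.ofList (List.replicate (PySem.Str.len "wordthree").toNat '*'))).toList
        = pvMask pvW3 s.toList := fun s => by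
    rw [PySem.Str.toList_replace]
    exact pvReplace_eq pvW3 s.toList (by simp [pvW3])
  have hFa : List.Forall₂ pvR (pvMask pvW1 message.toList) message.toList :=
    pvMask_forall₂ pvW1 message.toList.length message.toList (le_refl _)
  have hFb : List.Forall₂ pvR (pvMask pvW2 (pvMask pvW1 message.toList)) message.toList :=
    pvR_trans (pvMask_forall₂ pvW2 (pvMask pvW1 message.toList).length _ (le_refl _)) hFa
  have hFc : List.Forall₂ pvR (pvMask pvW2 message.toList) message.toList :=
    pvMask_forall₂ pvW2 message.toList.length message.toList (le_refl _)
  have hOf : ∀ l : List Char, (String.ofList l).toList = l := fun l => by simp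
  simp only [List.foldl_cons, List.foldl_nil]
  by_cases c1 : PySem.Str.isIn "wordone" message = true <;>
    by_cases c2 : PySem.Str.isIn "wordtwo" message = true <;>
      by_cases c3 : PySem.Str.isIn "wordthree" message = true <;>
        simp only [c1, c2, c3, Bool.false_eq_true, if_true, if_false,
          Prod.mk.injEq]
  ·
    have inf1 : pvW1 <:+: message.toList := by rw [← PySem.Chars.isIn_iff_infix]; exact c1
    refine ⟨?_, ?_⟩
    · apply String.toList_inj.mp
      rw [e3, e2, e1, hOf, hmask]
    · have h0 : (pvScan message.toList).2 ≠ 0 := fun hz => (hcount.mp hz) (Or.inl inf1)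
      simp [Nat.pos_of_ne_zero h0]
  ·
    have inf1 : pvW1 <:+: message.toList := by rw [← PySem.Chars.isIn_iff_infix]; exact c1
    have ni3 : ¬ pvW3 <:+: message.toList := fun hi => c3 (by rw [← PySem.Chars.isIn_iff_infix] at hi; exact hi)
    refine ⟨?_, ?_⟩
    · apply String.toList_inj.mp
      rw [e2, e1, hOf, hmask, pvMask_id_lift pvW3 (by decide) _ _ hFb ni3]
    · have h0 : (pvScan message.toList).2 ≠ 0 := fun hz => (hcount.mp hz) (Or.inl inf1)
      simp [Nat.pos_of_ne_zero h0]
  ·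
    have inf1 : pvW1 <:+: message.toList := by rw [← PySem.Chars.isIn_iff_infix]; exact c1
    have ni2 : ¬ pvW2 <:+: message.toList := fun hi => c2 (by rw [← PySem.Chars.isIn_iff_infix] at hi; exact hi)
    refine ⟨?_, ?_⟩
    · apply String.toList_inj.mp
      rw [e3, e1, hOf, hmask, pvMask_id_lift pvW2 (by decide) _ _ hFa ni2]
    · have h0 : (pvScan message.toList).2 ≠ 0 := fun hz => (hcount.mp hz) (Or.inl inf1)
      simp [Nat.pos_of_ne_zero h0]
  ·
    have inf1 : pvW1 <:+: message.toList := by rw [← PySem.Chars.isIn_iff_infix]; exact c1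
    have ni2 : ¬ pvW2 <:+: message.toList := fun hi => c2 (by rw [← PySem.Chars.isIn_iff_infix] at hi; exact hi)
    have ni3 : ¬ pvW3 <:+: message.toList := fun hi => c3 (by rw [← PySem.Chars.isIn_iff_infix] at hi; exact hi)
    refine ⟨?_, ?_⟩
    · apply String.toList_inj.mp
      rw [e1, hOf, hmask, pvMask_id_lift pvW2 (by decide) _ _ hFa ni2,
        pvMask_id_lift pvW3 (by decide) _ _ hFa ni3]
    · have h0 : (pvScan message.toList).2 ≠ 0 := fun hz => (hcount.mp hz) (Or.inl inf1)
      simp [Nat.pos_of_ne_zero h0]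
  ·
    have ni1 : ¬ pvW1 <:+: message.toList := fun hi => c1 (by rw [← PySem.Chars.isIn_iff_infix] at hi; exact hi)
    have inf2 : pvW2 <:+: message.toList := by rw [← PySem.Chars.isIn_iff_infix]; exact c2
    refine ⟨?_, ?_⟩
    · apply String.toList_inj.mp
      rw [e3, e2, hOf, hmask, pvCollapse1 _ ni1]
    · have h0 : (pvScan message.toList).2 ≠ 0 := fun hz => (hcount.mp hz) (Or.inr (Or.inl inf2))
      simp [Nat.pos_of_ne_zero h0]
  ·
    have ni1 : ¬ pvW1 <:+: message.toList := fun hi => c1 (by rw [← PySem.Chars.isIn_iff_infix] at hi; exact hi)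
    have inf2 : pvW2 <:+: message.toList := by rw [← PySem.Chars.isIn_iff_infix]; exact c2
    have ni3 : ¬ pvW3 <:+: message.toList := fun hi => c3 (by rw [← PySem.Chars.isIn_iff_infix] at hi; exact hi)
    refine ⟨?_, ?_⟩
    · apply String.toList_inj.mp
      rw [e2, hOf, hmask, pvCollapse1 _ ni1, pvMask_id_lift pvW3 (by decide) _ _ hFc ni3]
    · have h0 : (pvScan message.toList).2 ≠ 0 := fun hz => (hcount.mp hz) (Or.inr (Or.inl inf2))
      simp [Nat.pos_of_ne_zero h0]
  ·
    have ni1 : ¬ pvW1 <:+: message.toList := fun hi => c1 (by rw [← PySem.Chars.isIn_iff_infix] at hi; exact hi)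
    have ni2 : ¬ pvW2 <:+: message.toList := fun hi => c2 (by rw [← PySem.Chars.isIn_iff_infix] at hi; exact hi)
    have inf3 : pvW3 <:+: message.toList := by rw [← PySem.Chars.isIn_iff_infix]; exact c3
    refine ⟨?_, ?_⟩
    · apply String.toList_inj.mp
      rw [e3, hOf, hmask, pvCollapse1 _ ni1,
        pvMask_id pvW2 message.toList.length message.toList (le_refl _) ni2]
    · have h0 : (pvScan message.toList).2 ≠ 0 := fun hz => (hcount.mp hz) (Or.inr (Or.inr inf3))
      simp [Nat.pos_of_ne_zero h0]
  ·
    have ni1 : ¬ pvW1 <:+: message.toList := fun hi => c1 (by rw [← PySem.Chars.isIn_iff_infix] at hi; exact hi)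
    have ni2 : ¬ pvW2 <:+: message.toList := fun hi => c2 (by rw [← PySem.Chars.isIn_iff_infix] at hi; exact hi)
    have ni3 : ¬ pvW3 <:+: message.toList := fun hi => c3 (by rw [← PySem.Chars.isIn_iff_infix] at hi; exact hi)
    refine ⟨?_, ?_⟩
    · apply String.toList_inj.mp
      rw [hOf, hmask, pvCollapse1 _ ni1,
        pvMask_id pvW2 message.toList.length message.toList (le_refl _) ni2,
        pvMask_id pvW3 message.toList.length message.toList (le_refl _) ni3]
    · have hz : (pvScan message.toList).2 = 0 := by
        apply hcount.mpr
        rintro (h | h | h)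
        · exact ni1 h
        · exact ni2 h
        · exact ni3 h
      simp [hz]
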